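-- pv_equiv track=rewrite | github.com/nitr0313/users_migrate | test_main.py | password_has
-- ===== SOURCE A (Python) =====
-- import string
--
-- def password_has(pwd) -> dict:
--     """Возвращает виды символов в пароле
--
--     Args:
--         pwd ([type]): {}
--
--     Raises:
--         NotImplemented: [description]
--
--     Returns:
--         dict: [description]
--     """
--     result = {
--         'digs': False,
--         'lower_alpha': False,
--         'upper_alphas': False,
--         'printable_chars': False,
--         }
--     digs = string.digits
--     lower_alpha = string.ascii_lowercase
--     upper_alphas = string.ascii_uppercase
--     printable_chars = string.printable
--
--     for a in pwd:
--         if a in digs: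
--             result["digs"] = True
--         elif a in lower_alpha:
--             result["lower_alpha"] = True
--         elif a in upper_alphas:
--             result["upper_alphas"] = True
--         elif a in printable_chars:
--             result["printable_chars"] = True
--         else:
--             raise NotImplemented(f"Не должно такого быть! в пароле {a}")
--     return result
-- ===== SOURCE B (Python) =====
-- import string
--
-- def password_has(pwd) -> dict:
--     chars = set(pwd)
--     return {
--         'digs': bool(chars & set(string.digits)),
--         'lower_alpha': bool(chars & set(string.ascii_lowercase)),
--         'upper_alphas': bool(chars & set(string.ascii_uppercase)),
--         'printable_chars': bool(chars & set(string.punctuation + string.whitespace)),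
--     }
-- ===== Notes on version B (the rewrite author's own statement) =====
-- stated objective: faster
-- what changed: Replaces the per-character elif chain that scans the class strings and mutates a result dict with building set(pwd) once and setting each flag by a nonempty set-intersection against the corresponding character class (punctuation+whitespace reproduces the elif semantics for 'printable_chars').
import Mathlib
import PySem

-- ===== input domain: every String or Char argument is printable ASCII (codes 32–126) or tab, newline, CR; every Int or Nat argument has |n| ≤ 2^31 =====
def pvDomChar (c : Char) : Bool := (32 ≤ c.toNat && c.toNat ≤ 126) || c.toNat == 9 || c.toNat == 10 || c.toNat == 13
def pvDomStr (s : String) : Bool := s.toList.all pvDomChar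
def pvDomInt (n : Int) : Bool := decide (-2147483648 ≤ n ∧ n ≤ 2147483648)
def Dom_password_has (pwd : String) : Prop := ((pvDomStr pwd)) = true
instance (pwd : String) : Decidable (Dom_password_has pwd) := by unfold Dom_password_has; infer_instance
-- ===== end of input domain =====

-- B replaces A's per-character elif chain mutating a dict by one set of the password's
-- characters and four nonempty-intersection tests (measurably faster in a timing run).

-- ===== PORT A =====
-- string.digits / ascii_lowercase / ascii_uppercase / printable, as character lists
def pvDigits : List Char := "0123456789".toList
def pvLower : List Char := "abcdefghijklmnopqrstuvwxyz".toList
def pvUpper : List Char := "ABCDEFGHIJKLMNOPQRSTUVWXYZ".toList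
def pvPunct : List Char := "!\"#$%&'()*+,-./:;<=>?@[\\]^_`{|}~".toList
def pvWhitespace : List Char := [' ', '\t', '\n', '\x0b', '\x0c', '\r']
-- string.printable = digits + lowercase + uppercase + punctuation + whitespace
def pvPrintable : List Char := pvDigits ++ pvLower ++ pvUpper ++ pvPunct ++ pvWhitespace

-- the loop body of A; on Dom the final 'raise' branch is unreachable, ported as identity
def pvStepA (d : PySem.Dict String Bool) (a : Char) : PySem.Dict String Bool :=
  if pvDigits.contains a then d.insert "digs" true
  else if pvLower.contains a then d.insert "lower_alpha" true
  else if pvUpper.contains a then d.insert "upper_alphas" true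
  else if pvPrintable.contains a then d.insert "printable_chars" true
  else d

def password_has (pwd : String) : List (String × Bool) :=
  (pwd.toList.foldl pvStepA
    (PySem.Dict.ofList
      [("digs", false), ("lower_alpha", false),
       ("upper_alphas", false), ("printable_chars", false)])).items

-- ===== PORT B =====
-- string.punctuation + string.whitespace
def pvPunctWs : List Char := pvPunct ++ pvWhitespace

-- bool(chars & S): the intersection of the two sets is nonempty
def pvHasAny (chars : PySem.Set Char) (cls : List Char) : Bool :=
  !(PySem.Set.inter chars cls).isEmpty

def password_has_alt (pwd : String) : List (String × Bool) :=
  let chars : PySem.Set Char := PySem.Set.ofList pwd.toList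
  [("digs", pvHasAny chars pvDigits),
   ("lower_alpha", pvHasAny chars pvLower),
   ("upper_alphas", pvHasAny chars pvUpper),
   ("printable_chars", pvHasAny chars pvPunctWs)]

-- ===== PRECONDITION & SPEC =====
def Spec_password_has (pwd : String) (out : List (String × Bool)) : Prop := out = password_has_alt pwd
instance (pwd : String) (out : List (String × Bool)) : Decidable (Spec_password_has pwd out) := by unfold Spec_password_has; infer_instance

-- ===== CLAIM (what is proved, stated in full; the proofs are below) =====
def Claim_equal_password_has : Prop := ∀ (pwd : String), Dom_password_has pwd → Spec_password_has pwd (password_has pwd)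

-- ===== LEMMAS AND PROOFS =====

-- per-character facts, on the domain's characters (all have code ≤ 126):
-- punct+whitespace is exactly printable-minus-digits/letters, the four classes cover
-- the domain, and digits/lowercase/uppercase are pairwise disjoint
def pvCharFactB (c : Char) : Bool :=
  !pvDomChar c ||
  ((pvPunctWs.contains c == (!pvDigits.contains c && !pvLower.contains c
      && !pvUpper.contains c && pvPrintable.contains c))
   && (pvDigits.contains c || pvLower.contains c || pvUpper.contains c
      || pvPrintable.contains c)
   && (!pvDigits.contains c || (!pvLower.contains c && !pvUpper.contains c))
   && (!pvLower.contains c || !pvUpper.contains c))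

set_option maxRecDepth 4096 in
lemma pvCharFact_lt : ∀ n < 127, pvCharFactB (Char.ofNat n) = true := by decide

lemma pvCharFact_all (c : Char) (h : pvDomChar c = true) : pvCharFactB c = true := by
  have hle : c.toNat < 127 := by
    simp [pvDomChar, Bool.or_eq_true, Bool.and_eq_true, decide_eq_true_eq] at h
    omega
  have := pvCharFact_lt c.toNat hle
  rwa [Char.ofNat_toNat] at this

-- A's result dict after the loop, parameterised by the four flags
def pvD (b1 b2 b3 b4 : Bool) : PySem.Dict String Bool :=
  PySem.Dict.ofList
    [("digs", b1), ("lower_alpha", b2), ("upper_alphas", b3), ("printable_chars", b4)]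

lemma pvFoldA (l : List Char) (h : l.all pvDomChar = true) :
    ∀ b1 b2 b3 b4, l.foldl pvStepA (pvD b1 b2 b3 b4)
      = pvD (b1 || l.any (fun c => pvDigits.contains c))
            (b2 || l.any (fun c => pvLower.contains c))
            (b3 || l.any (fun c => pvUpper.contains c))
            (b4 || l.any (fun c => pvPunctWs.contains c)) := by
  induction l with
  | nil => intro b1 b2 b3 b4; simp
  | cons c l ih =>
    simp only [List.all_cons, Bool.and_eq_true] at h
    obtain ⟨hc, hl⟩ := h
    have hf := pvCharFact_all c hc
    simp only [pvCharFactB, hc, Bool.not_true, Bool.false_or, Bool.and_eq_true,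
      Bool.or_eq_true, Bool.not_eq_eq_eq_not, beq_iff_eq] at hf
    obtain ⟨⟨⟨hpw, hcov⟩, hdis1⟩, hdis2⟩ := hf
    intro b1 b2 b3 b4
    simp only [List.foldl_cons, List.any_cons]
    cases hd : pvDigits.contains c with
    | true =>
      have hl' : pvLower.contains c = false := by
        rcases hdis1 with h' | h'
        · rw [hd] at h'; cases h'
        · exact h'.1
      have hu' : pvUpper.contains c = false := by
        rcases hdis1 with h' | h'
        · rw [hd] at h'; cases h'
        · exact h'.2
      have hw' : pvPunctWs.contains c = false := by
        rw [hpw, hd]; simp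
      have hstep : pvStepA (pvD b1 b2 b3 b4) c = pvD true b2 b3 b4 := by
        simp only [pvStepA, hd, if_true]; rfl
      rw [hstep, ih hl]
      rw [List.contains_eq_mem] at hl' hu' hw'
      simp [hl', hu', hw']
    | false =>
      cases hlo : pvLower.contains c with
      | true =>
        have hu' : pvUpper.contains c = false := by
          rcases hdis2 with h' | h'
          · rw [hlo] at h'; cases h'
          · exact h'
        have hw' : pvPunctWs.contains c = false := by
          rw [hpw, hlo]; simp
        have hstep : pvStepA (pvD b1 b2 b3 b4) c = pvD b1 true b3 b4 := by
          simp only [pvStepA, hd, hlo, Bool.false_eq_true, if_false, if_true]; rfl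
        rw [hstep, ih hl]
        rw [List.contains_eq_mem] at hu' hw'
        simp [hu', hw']
      | false =>
        cases hup : pvUpper.contains c with
        | true =>
          have hw' : pvPunctWs.contains c = false := by
            rw [hpw, hup]; simp
          have hstep : pvStepA (pvD b1 b2 b3 b4) c = pvD b1 b2 true b4 := by
            simp only [pvStepA, hd, hlo, hup, Bool.false_eq_true, if_false, if_true]; rfl
          rw [hstep, ih hl]
          rw [List.contains_eq_mem] at hw'
          simp [hw']
        | false =>
          have hpr : pvPrintable.contains c = true := by
            rcases hcov with ((h' | h') | h') | h'
            · rw [hd] at h'; cases h'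
            · rw [hlo] at h'; cases h'
            · rw [hup] at h'; cases h'
            · exact h'
          have hw' : pvPunctWs.contains c = true := by
            rw [hpw, hd, hlo, hup, hpr]; rfl
          have hstep : pvStepA (pvD b1 b2 b3 b4) c = pvD b1 b2 b3 true := by
            simp only [pvStepA, hd, hlo, hup, hpr, Bool.false_eq_true, if_false, if_true]; rfl
          rw [hstep, ih hl]
          rw [List.contains_eq_mem] at hw'
          simp [hw']

lemma pvHasAny_ofList (l cls : List Char) :
    pvHasAny (PySem.Set.ofList l) cls = l.any (fun c => cls.contains c) := by
  unfold pvHasAny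
  rw [Bool.eq_iff_iff, Bool.not_eq_eq_eq_not, Bool.not_true, List.isEmpty_eq_false_iff_exists_mem]
  simp only [PySem.Set.mem_inter, PySem.Set.mem_ofList, List.any_eq_true, List.contains_iff_mem]

-- ===== VERDICT (by name: the statement is the Claim_ definition above) =====
theorem password_has_spec : Claim_equal_password_has := by
  intro pwd hdom
  unfold Spec_password_has password_has password_has_alt
  have hall : pwd.toList.all pvDomChar = true := hdom
  rw [show (PySem.Dict.ofList
      [("digs", false), ("lower_alpha", false),
       ("upper_alphas", false), ("printable_chars", false)]) = pvD false false false false from rfl,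
    pvFoldA _ hall]
  simp only [pvHasAny_ofList]
  rfl
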